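-- pv_equiv track=rewrite | github.com/evan-greenbrg/mobility | mobility/puller_fun.py | getQuarters
-- ===== SOURCE A (Python) =====
-- MONTHS = ['01', '02', '03', '04', '05', '06', '07', '08',
--     '09', '10', '11', '12', ]
--
-- def getQuarters(min_water):
--     quarters = []
--     quarter = []
--     for i, mo in enumerate(range(min_water, min_water + 12)):
--         if mo > 12:
--             mo -= 12
--
--         if (i + 1) % 3:
--             quarter.append(MONTHS[mo - 1])
--         else:
--             quarter.append(MONTHS[mo - 1])
--             quarters.append(quarter)
--             quarter = []
--
--     return quarters
-- ===== SOURCE B (Python) =====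
-- MONTHS = ['01', '02', '03', '04', '05', '06', '07', '08',
--     '09', '10', '11', '12', ]
--
-- def getQuarters(min_water):
--     tokens = []
--     for i in range(12):
--         mo = min_water + i
--         if mo > 12:
--             mo -= 12
--         tokens.append(MONTHS[mo - 1])
--     return [tokens[j:j + 3] for j in range(0, 12, 3)]
-- ===== Notes on version B (the rewrite author's own statement) =====
-- stated objective: simpler
-- what changed: B replaces A's stateful accumulate-and-flush-every-3 loop (enumerate with a (i+1)%3 flush test and a mutable current quarter) by a build-then-chunk decomposition: first the flat 12-token month list, then slicing it into 3-element quarters. Pre_ excludes min_water outside [-11,13], where both A and B raise IndexError.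
import Mathlib
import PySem

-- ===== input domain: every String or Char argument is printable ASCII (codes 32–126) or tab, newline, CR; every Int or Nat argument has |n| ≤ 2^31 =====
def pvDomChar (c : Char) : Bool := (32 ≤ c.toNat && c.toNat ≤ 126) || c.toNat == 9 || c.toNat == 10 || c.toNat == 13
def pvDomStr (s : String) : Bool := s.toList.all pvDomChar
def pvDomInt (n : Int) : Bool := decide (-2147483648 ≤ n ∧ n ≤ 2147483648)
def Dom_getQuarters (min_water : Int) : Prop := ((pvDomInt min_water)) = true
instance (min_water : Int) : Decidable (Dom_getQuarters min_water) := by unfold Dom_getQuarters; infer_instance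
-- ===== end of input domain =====

-- B replaces A's stateful accumulate-and-flush-every-3 loop by building the flat 12-month token list and chunking it into 3-element slices (objective: simpler).


def MONTHS : List String := ["01", "02", "03", "04", "05", "06", "07", "08",
    "09", "10", "11", "12"]

-- ===== PORT A =====
-- A: enumerate over range(min_water, min_water+12), accumulate a current quarter, flush when (i+1)%3 == 0.
def getQuarters (min_water : Int) : List (List String) :=
  -- enumerate(range(...)) = zipIdx: p.1 is mo, p.2 is the index i
  let st := (PySem.List.pyRange min_water (min_water + 12) 1).zipIdx.foldl
    (fun (st : List (List String) × List String) (p : Int × Nat) =>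
      let mo := if p.1 > 12 then p.1 - 12 else p.1
      let tok := (PySem.List.pyGet? MONTHS (mo - 1)).getD ""   -- none = IndexError, excluded by Pre_
      if ((p.2 : Int) + 1) % 3 ≠ 0 then (st.1, st.2 ++ [tok])
      else (st.1 ++ [st.2 ++ [tok]], []))
    ([], [])
  st.1

-- ===== PORT B =====
-- B: build the flat 12-token list, then chunk by slicing.
def getQuarters_alt (min_water : Int) : List (List String) :=
  let tokens := (PySem.List.pyRange 0 12 1).foldl
    (fun (acc : List String) (i : Int) =>
      let mo := min_water + i
      let mo := if mo > 12 then mo - 12 else mo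
      acc ++ [(PySem.List.pyGet? MONTHS (mo - 1)).getD ""])   -- none = IndexError, excluded by Pre_
    []
  (PySem.List.pyRange 0 12 3).map (fun j => PySem.List.slice tokens (some j) (some (j + 3)))

-- ===== PRECONDITION & SPEC =====
-- Pre_ excludes exactly the inputs on which A (and B alike) raises IndexError: some month index
-- leaves [-12, 11] even after the single -12 wrap, i.e. min_water < -11 or min_water > 13.
def Pre_getQuarters (min_water : Int) : Prop := -11 ≤ min_water ∧ min_water ≤ 13
instance (min_water : Int) : Decidable (Pre_getQuarters min_water) := by unfold Pre_getQuarters; infer_instance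
def pvWitness_getQuarters : Int := (5)
def Spec_getQuarters (min_water : Int) (out : List (List String)) : Prop := out = getQuarters_alt min_water
instance (min_water : Int) (out : List (List String)) : Decidable (Spec_getQuarters min_water out) := by unfold Spec_getQuarters; infer_instance

-- ===== CLAIM (what is proved, stated in full; the proofs are below) =====
def Claim_equal_getQuarters : Prop := ∀ (min_water : Int), Dom_getQuarters min_water → Pre_getQuarters min_water → Spec_getQuarters min_water (getQuarters min_water)

-- ===== LEMMAS AND PROOFS =====

-- ===== VERDICT (by name: the statement is the Claim_ definition above) =====
theorem getQuarters_spec : Claim_equal_getQuarters := by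
  intro mw _ hp
  obtain ⟨h1, h2⟩ := hp
  interval_cases mw <;> decide
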